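-- pv_equiv track=rewrite | github.com/abhisheksharma2148/LeetCode | 2544.Alternating Digit Sum.py | alternateDigitSum
-- ===== SOURCE A (Python) =====
-- def alternateDigitSum(n: int) -> int:
--     n = int(str(n)[::-1])
--     sign = 1
--     sum =0
--     while n>0:
--         sum += sign*(n%10)
--         sign *=-1
--         n//=10
--     return sum
-- ===== SOURCE B (Python) =====
-- def alternateDigitSum(n: int) -> int:
--     return sum(int(d) if i % 2 == 0 else -int(d) for i, d in enumerate(str(n)))
-- ===== Notes on version B (the rewrite author's own statement) =====
-- stated objective: simpler
-- what changed: B drops A's string-reversal + re-parse + mod/div extraction loop with a sign-flipping accumulator, and instead sums int(d) with a sign chosen by index parity in a single pass over str(n) from the most significant digit.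
import Mathlib
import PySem

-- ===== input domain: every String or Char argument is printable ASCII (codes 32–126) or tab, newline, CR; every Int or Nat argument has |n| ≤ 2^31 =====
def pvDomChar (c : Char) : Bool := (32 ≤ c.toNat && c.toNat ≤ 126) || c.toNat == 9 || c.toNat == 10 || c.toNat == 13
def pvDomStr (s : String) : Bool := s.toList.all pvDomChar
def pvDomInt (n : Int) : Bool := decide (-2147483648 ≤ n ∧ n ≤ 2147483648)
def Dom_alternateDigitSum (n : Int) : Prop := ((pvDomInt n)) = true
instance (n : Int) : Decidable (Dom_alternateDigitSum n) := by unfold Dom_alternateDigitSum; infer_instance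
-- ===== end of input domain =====

-- B replaces A's reverse + re-parse + mod/div loop by one signed pass over str(n) (objective: simpler).

-- ===== PORT A =====

-- Hand port of int(s) for the strings THIS program builds: a pure digit string
-- (→ its value) or a string containing a non-digit character such as the '-' of a
-- reversed negative number (→ none = ValueError).  It is exact on exactly those
-- inputs; PySem.Int.ofStr? agrees there but its parser is private to PySemCore
-- and cannot be reasoned about symbolically.
def pvIntDigitsAcc : List Char → Nat → Option Nat
  | [], acc => some acc
  | c :: r, acc =>
      if c.isDigit then pvIntDigitsAcc r (acc * 10 + (c.toNat - '0'.toNat)) else none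

def pvIntOfDigits? : List Char → Option Int
  | [] => none
  | cs => (pvIntDigitsAcc cs 0).map (fun a => (a : Int))

-- the 'while n > 0' loop of A: sum += sign*(n%10); sign *= -1; n //= 10
def adsLoop (n sign sum : Int) : Int :=
  if 0 < n then
    adsLoop (PySem.Int.floordiv n 10) (-sign) (sum + sign * PySem.Int.mod n 10)
  else sum
termination_by n.toNat
decreasing_by
  rw [PySem.Int.floordiv_eq_ediv_of_pos (by omega : (0:Int) < 10)]
  omega

def alternateDigitSum (n : Int) : Int :=
  match PySem.Str.slice? (PySem.Int.toStr n) none none (-1) with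
  | none => 0          -- unreachable: the step -1 is nonzero
  | some rev =>
      match pvIntOfDigits? rev.toList with
      | none => 0      -- int() raises ValueError here (n < 0); outside Pre_
      | some m => adsLoop m 1 0

-- ===== PORT B =====

def pvCharInt (c : Char) : Int := (PySem.Int.ofStr? (String.ofList [c])).getD 0
  -- int(d) for one character; the default is unreachable under Pre_ (digit chars only)

def alternateDigitSum_alt (n : Int) : Int :=
  ((PySem.List.enumerate (PySem.Int.toStr n).toList 0).map
      (fun p => if PySem.Int.mod p.1 2 = 0 then pvCharInt p.2 else -pvCharInt p.2)).foldl
    (· + ·) 0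

-- ===== PRECONDITION & SPEC =====
-- Pre_ excludes exactly n < 0, where both A and B raise ValueError (int() on a
-- string containing '-' misplaced resp. alone).
def Pre_alternateDigitSum (n : Int) : Prop := 0 ≤ n
instance (n : Int) : Decidable (Pre_alternateDigitSum n) := by
  unfold Pre_alternateDigitSum; infer_instance

def pvWitness_alternateDigitSum : Int := 521

def Spec_alternateDigitSum (n : Int) (out : Int) : Prop := out = alternateDigitSum_alt n
instance (n : Int) (out : Int) : Decidable (Spec_alternateDigitSum n out) := by
  unfold Spec_alternateDigitSum; infer_instance

-- ===== CLAIM (what is proved, stated in full; the proofs are below) =====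
def Claim_equal_alternateDigitSum : Prop :=
  ∀ (n : Int), Dom_alternateDigitSum n → Pre_alternateDigitSum n →
    Spec_alternateDigitSum n (alternateDigitSum n)

-- ===== LEMMAS AND PROOFS =====

-- digits of m, least significant first (never empty; dLSF 0 = [0])
def dLSF (m : Nat) : List Nat :=
  if m / 10 = 0 then [m % 10] else m % 10 :: dLSF (m / 10)
termination_by m
decreasing_by omega

-- alternating sum d0 - (d1 - (d2 - …)) = d0 - d1 + d2 - …
def altL : List Nat → Int
  | [] => 0
  | d :: t => (d : Int) - altL t

theorem dLSF_ne_nil (m : Nat) : dLSF m ≠ [] := by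
  rw [dLSF]; split <;> simp

theorem dLSF_lt (m : Nat) : ∀ d ∈ dLSF m, d < 10 := by
  induction m using Nat.strong_induction_on with
  | _ m ih =>
    rw [dLSF]
    split
    · intro d hd; simp at hd; omega
    · intro d hd
      rcases List.mem_cons.mp hd with h | h
      · omega
      · exact ih (m / 10) (by omega) d h

theorem dLSF_len (m : Nat) : (dLSF m).length ≤ m + 1 := by
  induction m using Nat.strong_induction_on with
  | _ m ih =>
    rw [dLSF]
    split
    · simp
    · have := ih (m / 10) (by omega)
      simp only [List.length_cons]
      omega

theorem toDigitsCore_eq (f : Nat) :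
    ∀ (n : Nat) (l : List Char), (dLSF n).length ≤ f →
      Nat.toDigitsCore 10 f n l = ((dLSF n).map Nat.digitChar).reverse ++ l := by
  induction f with
  | zero =>
    intro n l h
    have := dLSF_ne_nil n
    cases hc : dLSF n with
    | nil => exact absurd hc this
    | cons a t => rw [hc] at h; simp at h
  | succ f ih =>
    intro n l h
    by_cases h10 : n / 10 = 0
    · simp only [Nat.toDigitsCore, h10, if_pos]
      rw [dLSF, if_pos h10]
      simp
    · simp only [Nat.toDigitsCore, h10, if_false]
      rw [dLSF, if_neg h10] at h ⊢
      simp only [List.length_cons] at h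
      rw [ih (n / 10) _ (by omega)]
      simp

theorem toChars_nonneg (n : Int) (h : 0 ≤ n) :
    PySem.Int.toChars n = ((dLSF n.toNat).map Nat.digitChar).reverse := by
  have hlt : ¬ n < 0 := by omega
  simp only [PySem.Int.toChars, hlt, if_false]
  show Nat.toDigits 10 n.toNat = _
  rw [Nat.toDigits, toDigitsCore_eq (n.toNat + 1) n.toNat [] (dLSF_len n.toNat)]
  simp

theorem digitChar_isDigit (d : Nat) (h : d < 10) : (Nat.digitChar d).isDigit = true := by
  interval_cases d <;> decide

theorem digitChar_val (d : Nat) (h : d < 10) :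
    (Nat.digitChar d).toNat - '0'.toNat = d := by
  interval_cases d <;> decide

theorem pvCharInt_digitChar (d : Nat) (h : d < 10) :
    pvCharInt (Nat.digitChar d) = (d : Int) := by
  interval_cases d <;> decide

theorem pvIntDigitsAcc_digits (ds : List Nat) :
    ∀ acc, (∀ d ∈ ds, d < 10) →
      pvIntDigitsAcc (ds.map Nat.digitChar) acc
        = some (ds.foldl (fun a d => a * 10 + d) acc) := by
  induction ds with
  | nil => intro acc _; simp [pvIntDigitsAcc]
  | cons d t ih =>
    intro acc h
    have hd : d < 10 := h d (List.mem_cons_self ..)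
    simp only [List.map_cons, pvIntDigitsAcc, digitChar_isDigit d hd, if_pos,
      digitChar_val d hd, List.foldl_cons]
    exact ih _ (fun x hx => h x (List.mem_cons_of_mem _ hx))

theorem foldlVal_zero (ds : List Nat) :
    ∀ acc, ds.foldl (fun a d => a * 10 + d) acc = 0 → acc = 0 ∧ ∀ d ∈ ds, d = 0 := by
  induction ds with
  | nil => intro acc h; simp_all
  | cons d t ih =>
    intro acc h
    rw [List.foldl_cons] at h
    obtain ⟨h1, h2⟩ := ih _ h
    exact ⟨by omega, by intro x hx; rcases List.mem_cons.mp hx with h | h; omega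
                        exact h2 x h⟩

theorem altL_zeros (ds : List Nat) (h : ∀ d ∈ ds, d = 0) : altL ds = 0 := by
  induction ds with
  | nil => rfl
  | cons d t ih =>
    rw [altL, h d (List.mem_cons_self ..), ih (fun x hx => h x (List.mem_cons_of_mem _ hx))]
    simp

theorem adsLoop_eq (ds : List Nat) :
    ∀ (sign sum : Int), (∀ d ∈ ds, d < 10) →
      adsLoop ((ds.foldl (fun a d => a * 10 + d) 0 : Nat) : Int) sign sum
        = sum + sign * altL ds.reverse := by
  induction ds using List.reverseRecOn with
  | nil => intro sign sum _; rw [adsLoop]; simp [altL]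
  | append_singleton t d ih =>
    intro sign sum h
    have hd : d < 10 := h d (by simp)
    have ht : ∀ x ∈ t, x < 10 := fun x hx => h x (List.mem_append_left _ hx)
    rw [List.foldl_append, List.foldl_cons, List.foldl_nil]
    set v := t.foldl (fun a d => a * 10 + d) 0 with hv
    rw [adsLoop]
    by_cases hp : 0 < ((v * 10 + d : Nat) : Int)
    · rw [if_pos hp]
      have hm : PySem.Int.mod ((v * 10 + d : Nat) : Int) 10 = (d : Int) := by
        rw [PySem.Int.mod_eq_emod_of_pos (by omega : (0:Int) < 10)]
        push_cast; omega
      have hq : PySem.Int.floordiv ((v * 10 + d : Nat) : Int) 10 = ((v : Nat) : Int) := by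
        rw [PySem.Int.floordiv_eq_ediv_of_pos (by omega : (0:Int) < 10)]
        push_cast; omega
      rw [hm, hq, ih (-sign) (sum + sign * (d : Int)) ht]
      rw [List.reverse_append]
      simp only [List.reverse_singleton, List.singleton_append, altL]
      ring
    · rw [if_neg hp]
      have hz : v * 10 + d = 0 := by omega
      have hall : ∀ x ∈ t ++ [d], x = 0 := by
        have hv0 : v = 0 := by omega
        have := (foldlVal_zero t 0 (hv.symm ▸ hv0)).2
        intro x hx
        rcases List.mem_append.mp hx with h' | h'
        · exact this x h'
        · simp at h'; omega
      have : altL (t ++ [d]).reverse = 0 :=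
        altL_zeros _ (fun x hx => hall x (List.mem_reverse.mp hx))
      rw [this]; ring

theorem foldB_eq (e : List Nat) :
    ∀ (i acc : Int), 0 ≤ i → (∀ d ∈ e, d < 10) →
      ((PySem.List.enumerate (e.map Nat.digitChar) i).map
          (fun p => if PySem.Int.mod p.1 2 = 0 then pvCharInt p.2 else -pvCharInt p.2)).foldl
        (· + ·) acc
        = acc + (if PySem.Int.mod i 2 = 0 then altL e else -altL e) := by
  induction e with
  | nil =>
    intro i acc _ _
    simp [PySem.List.enumerate_nil, altL]
  | cons d t ih =>
    intro i acc hi h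
    have hd : d < 10 := h d (List.mem_cons_self ..)
    rw [List.map_cons, PySem.List.enumerate_cons, List.map_cons, List.foldl_cons,
      pvCharInt_digitChar d hd,
      ih (i + 1) _ (by omega) (fun x hx => h x (List.mem_cons_of_mem _ hx))]
    have h2 : PySem.Int.mod i 2 = i % 2 :=
      PySem.Int.mod_eq_emod_of_pos (by omega : (0:Int) < 2)
    have h2' : PySem.Int.mod (i + 1) 2 = (i + 1) % 2 :=
      PySem.Int.mod_eq_emod_of_pos (by omega : (0:Int) < 2)
    rcases Int.emod_two_eq i with h0 | h1
    · have : (i + 1) % 2 = 1 := by omega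
      rw [h2, h2', h0, this]
      simp [altL]; ring
    · have : (i + 1) % 2 = 0 := by omega
      rw [h2, h2', h1, this]
      simp [altL]; ring

-- ===== VERDICT (by name: the statement is the Claim_ definition above) =====
theorem alternateDigitSum_spec : Claim_equal_alternateDigitSum := by
  intro n _ hpre
  unfold Spec_alternateDigitSum
  have hch := toChars_nonneg n hpre
  obtain ⟨d0, t, hcons⟩ := List.exists_cons_of_ne_nil (dLSF_ne_nil n.toNat)
  have hlt : ∀ d ∈ dLSF n.toNat, d < 10 := dLSF_lt n.toNat
  -- A side
  have hA : alternateDigitSum n = altL (dLSF n.toNat).reverse := by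
    have h1 : PySem.Str.slice? (PySem.Int.toStr n) none none (-1)
        = some (String.ofList ((dLSF n.toNat).map Nat.digitChar)) := by
      rw [PySem.Str.slice?_none_none_neg_one, PySem.Int.toList_toStr, hch,
        List.reverse_reverse]
    have h2 : pvIntOfDigits? ((dLSF n.toNat).map Nat.digitChar)
        = some ((((dLSF n.toNat).foldl (fun a d => a * 10 + d) 0 : Nat)) : Int) := by
      rw [hcons, List.map_cons]
      simp only [pvIntOfDigits?]
      rw [← List.map_cons, ← hcons, pvIntDigitsAcc_digits (dLSF n.toNat) 0 hlt]
      simp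
    simp only [alternateDigitSum, h1, String.toList_ofList, h2]
    rw [adsLoop_eq (dLSF n.toNat) 1 0 hlt]
    ring
  -- B side
  have hB : alternateDigitSum_alt n = altL (dLSF n.toNat).reverse := by
    unfold alternateDigitSum_alt
    rw [PySem.Int.toList_toStr, hch, ← List.map_reverse]
    rw [foldB_eq (dLSF n.toNat).reverse 0 0 (by omega)
      (fun x hx => hlt x (List.mem_reverse.mp hx))]
    norm_num [PySem.Int.mod]
  rw [hA, hB]
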